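-- pv_equiv track=rewrite | github.com/adamheins/stercus | stercus.py | compile_function
-- ===== SOURCE A (Python) =====
-- DATA_SIZE = 10000
--
-- APPLICATOR_START = '['
--
-- APPLICATOR_END = ']'
--
-- CONDITIONAL_START = '('
--
-- CONDITIONAL_END = ')'
--
-- INCREMENT = '+'
--
-- DECREMENT = '-'
--
-- OUTPUT = '.'
--
-- INPUT = ','
--
-- NOP = '_'
--
-- def compile_function(name, args, tokens, func_list):
--     """ Compile a function from stercus to C. """
--
--     def apply(application, accessor):
--         """ Apply an application to the accessed location. """
--         ele = '_d[' + accessor + ']';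
--         if application == NOP:
--             pass
--         elif application == INCREMENT:
--             output.append(ele + '++;')
--         elif application == DECREMENT:
--             output.append(ele + '--;')
--         elif application == OUTPUT:
--             output.append('putchar(' + ele + ');')
--         elif application == INPUT:
--             output.append(ele + ' = getchar();')
--         elif application in func_list:
--             output.append(application + '(' + accessor + ');')
--         else:
--             output.append(ele + ' = ' + application + ';')
--
--     output = ['void ' + name + '(' + args + ') {']
--     if name == 'main':
--         output.append('_d=(unsigned char *)calloc(' + str(DATA_SIZE) + ', 1);')
--     stack = []
--
--     for token in tokens:
--         if token == APPLICATOR_END: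
--             li = []
--             val = stack.pop()
--             while val != APPLICATOR_START:
--                 li.append(val)
--                 val = stack.pop()
--             li.reverse()
--             accessor = li[0]
--             for application in li[1:]:
--                 apply(application, accessor)
--             if len(stack) > 0 and stack[-1] == CONDITIONAL_START:
--                 output.append('if(!_d[_d[' + accessor + ']]){break;}')
--             stack.append('_d[' + accessor + ']')
--         elif token == CONDITIONAL_END:
--             val = stack.pop()
--             while val != CONDITIONAL_START:
--                 val = stack.pop()
--             output.append('}')
--         elif token == CONDITIONAL_START:
--             output.append('while(1){')
--             stack.append(token)
--         elif token == APPLICATOR_START: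
--             stack.append(token)
--         else:
--             # Check if the token is the accessor for a conditional.
--             if len(stack) > 0 and stack[-1] == CONDITIONAL_START:
--                 output.append('if(!_d[' + token + ']){break;}')
--             stack.append(token)
--
--     output.append('}')
--     return '\n'.join(output)
-- ===== SOURCE B (Python) =====
-- def compile_function(name, args, tokens, func_list):
--     """ Compile a function from stercus to C (recursive descent over a token index). """
--
--     output = ['void ' + name + '(' + args + ') {']
--     if name == 'main':
--         output.append('_d=(unsigned char *)calloc(10000, 1);')
--
--     def apply(application, accessor):
--         ele = '_d[' + accessor + ']'
--         if application == '_':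
--             pass
--         elif application == '+':
--             output.append(ele + '++;')
--         elif application == '-':
--             output.append(ele + '--;')
--         elif application == '.':
--             output.append('putchar(' + ele + ');')
--         elif application == ',':
--             output.append(ele + ' = getchar();')
--         elif application in func_list:
--             output.append(application + '(' + accessor + ');')
--         else:
--             output.append(ele + ' = ' + application + ';')
--
--     def parse_item(i):
--         # tokens[i] starts an item: a '[...]' applicator or a bare accessor token.
--         # Returns (accessor value, index past the item).
--         if tokens[i] == '[':
--             accessor, i = parse_item(i + 1)
--             applications = []
--             while tokens[i] != ']':
--                 application, i = parse_item(i)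
--                 applications.append(application)
--             for application in applications:
--                 apply(application, accessor)
--             return '_d[' + accessor + ']', i + 1
--         return tokens[i], i + 1
--
--     def parse_units(i, front):
--         # Parse sequential units up to a closing ')' (or the end of input).
--         # front is True while no accessor unit has been seen yet inside a '('.
--         while i < len(tokens) and tokens[i] != ')':
--             if tokens[i] == '(':
--                 output.append('while(1){')
--                 i = parse_units(i + 1, True)
--             else:
--                 accessor, i = parse_item(i)
--                 if front:
--                     output.append('if(!_d[' + accessor + ']){break;}')
--                 front = False
--         if i < len(tokens):
--             output.append('}')
--             i += 1
--         return i
--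
--     parse_units(0, False)
--     output.append('}')
--     return '\n'.join(output)
-- ===== Notes on version B (the rewrite author's own statement) =====
-- stated objective: alternative
-- what changed: Replaces A's explicit token stack with pop-until-marker loops by a recursive-descent parser over the token list (parse_item/parse_units) that threads a front-of-conditional flag instead of inspecting the stack top.
-- outside the precondition, e.g. on compile_function('f', '', ['['], []): A returns 'void f() {\n}', B raises IndexError
import Mathlib
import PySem

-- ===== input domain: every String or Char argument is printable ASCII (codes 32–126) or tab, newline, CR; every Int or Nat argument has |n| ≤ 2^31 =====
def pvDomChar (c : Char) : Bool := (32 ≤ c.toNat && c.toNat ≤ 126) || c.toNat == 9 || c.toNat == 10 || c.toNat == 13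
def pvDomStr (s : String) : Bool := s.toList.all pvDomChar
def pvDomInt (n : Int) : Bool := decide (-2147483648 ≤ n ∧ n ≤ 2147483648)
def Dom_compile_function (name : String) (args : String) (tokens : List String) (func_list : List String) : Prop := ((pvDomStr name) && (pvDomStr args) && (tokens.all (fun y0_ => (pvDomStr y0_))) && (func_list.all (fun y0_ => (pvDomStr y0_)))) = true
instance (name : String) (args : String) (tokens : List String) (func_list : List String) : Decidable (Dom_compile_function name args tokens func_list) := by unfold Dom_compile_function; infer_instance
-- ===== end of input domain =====

-- B replaces A's explicit token stack (pop-until-marker loops) by a recursive-descent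
-- parser over the token list; equivalence is proved on well-formed stercus token
-- streams (Pre_ below).

-- ===== PORT A =====
-- the nested 'apply' helper (identical in Source A and Source B)
def pvApply (func_list : List String) (output : List String) (application accessor : String) : List String :=
  let ele := "_d[" ++ accessor ++ "]"
  if application = "_" then output
  else if application = "+" then output ++ [ele ++ "++;"]
  else if application = "-" then output ++ [ele ++ "--;"]
  else if application = "." then output ++ ["putchar(" ++ ele ++ ");"]
  else if application = "," then output ++ [ele ++ " = getchar();"]
  else if func_list.contains application then output ++ [application ++ "(" ++ accessor ++ ");"]
  else output ++ [ele ++ " = " ++ application ++ ";"]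

-- 'li = []; val = stack.pop(); while val != '[': li.append(val); val = stack.pop(); li.reverse()'
-- (stack head = top; returns (reversed li, remaining stack); Python raises IndexError on
--  underflow — excluded by Pre_ — here the junk (li, []) is returned)
def pvPopApp : List String → List String → List String × List String
  | [], li => (li, [])
  | v :: s, li => if v = "[" then (li, s) else pvPopApp s (v :: li)

-- 'val = stack.pop(); while val != '(': val = stack.pop()'  (junk [] on underflow, outside Pre_)
def pvPopCond : List String → List String
  | [] => []
  | v :: s => if v = "(" then s else pvPopCond s

-- the body of 'for token in tokens', state = (output, stack)
def pvStepA (func_list : List String) (st : List String × List String) (token : String) : List String × List String :=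
  let output := st.1
  let stack := st.2
  if token = "]" then
    let p := pvPopApp stack []
    let li := p.1
    let stack' := p.2
    let accessor := li.headD ""          -- li[0]; li ≠ [] under Pre_
    let output := li.tail.foldl (fun o a => pvApply func_list o a accessor) output
    let output := if stack'.head? = some "(" then output ++ ["if(!_d[_d[" ++ accessor ++ "]]){break;}"] else output
    (output, ("_d[" ++ accessor ++ "]") :: stack')
  else if token = ")" then (output ++ ["}"], pvPopCond stack)
  else if token = "(" then (output ++ ["while(1){"], token :: stack)
  else if token = "[" then (output, token :: stack)
  else
    let output := if stack.head? = some "(" then output ++ ["if(!_d[" ++ token ++ "]){break;}"] else output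
    (output, token :: stack)

def compile_function (name : String) (args : String) (tokens : List String) (func_list : List String) : String :=
  let output := ["void " ++ name ++ "(" ++ args ++ ") {"]
  let output := if name = "main" then output ++ ["_d=(unsigned char *)calloc(" ++ PySem.Int.toStr 10000 ++ ", 1);"] else output
  let r := tokens.foldl (pvStepA func_list) (output, [])
  PySem.Str.join "\n" (r.1 ++ ["}"])

-- ===== PORT B =====
-- Source B's parse_item / parse_units: recursive descent over a token index; results carry
-- (output, value, next index).  The fuel argument only makes the mutual recursion total
-- (Python's tokens[i] out of range raises IndexError, outside Pre_); fuel 2*len+2 never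
-- runs out on Pre_ inputs.  tokens.getD i "" is tokens[i] (the default is reached only
-- where Python raises, outside Pre_).
mutual
def pvParseItem (func_list tokens : List String) : Nat → List String → Nat → List String × String × Nat
  | 0, output, i => (output, "", i)
  | fuel + 1, output, i =>
    if tokens.getD i "" = "[" then
      let r1 := pvParseItem func_list tokens fuel output (i + 1)
      let r2 := pvParseApps func_list tokens fuel r1.1 r1.2.2
      let output := r2.2.1.foldl (fun o a => pvApply func_list o a r1.2.1) r2.1
      (output, "_d[" ++ r1.2.1 ++ "]", r2.2.2 + 1)
    else (output, tokens.getD i "", i + 1)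

-- the 'while tokens[i] != ']'' loop of parse_item: collects the applications,
-- leaving the index on the ']'
def pvParseApps (func_list tokens : List String) : Nat → List String → Nat → List String × List String × Nat
  | 0, output, i => (output, [], i)
  | fuel + 1, output, i =>
    if tokens.getD i "" = "]" then (output, [], i)
    else
      let r1 := pvParseItem func_list tokens fuel output i
      let r2 := pvParseApps func_list tokens fuel r1.1 r1.2.2
      (r2.1, r1.2.1 :: r2.2.1, r2.2.2)
end

def pvParseUnits (func_list tokens : List String) : Nat → List String → Bool → Nat → List String × Nat
  | 0, output, _, i => (output, i)
  | fuel + 1, output, front, i =>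
    if i < tokens.length then
      if tokens.getD i "" = ")" then (output ++ ["}"], i + 1)
      else if tokens.getD i "" = "(" then
        let r1 := pvParseUnits func_list tokens fuel (output ++ ["while(1){"]) true (i + 1)
        pvParseUnits func_list tokens fuel r1.1 front r1.2
      else
        let r1 := pvParseItem func_list tokens fuel output i
        let output := if front then r1.1 ++ ["if(!_d[" ++ r1.2.1 ++ "]){break;}"] else r1.1
        pvParseUnits func_list tokens fuel output false r1.2.2
    else (output, i)

def compile_function_alt (name : String) (args : String) (tokens : List String) (func_list : List String) : String :=
  let output := ["void " ++ name ++ "(" ++ args ++ ") {"]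
  let output := if name = "main" then output ++ ["_d=(unsigned char *)calloc(" ++ PySem.Int.toStr 10000 ++ ", 1);"] else output
  let r := pvParseUnits func_list tokens (2 * tokens.length + 2) output false 0
  PySem.Str.join "\n" (r.1 ++ ["}"])

-- ===== PRECONDITION & SPEC =====
-- marker stack: 'a' = applicator awaiting its accessor, 'b' = applicator with accessor, 'c' = conditional
def pvBump : List Char → List Char
  | 'a' :: m => 'b' :: m
  | m => m

def pvWf1 : List Char → String → Option (List Char) := fun m t =>
  if t = "[" then some ('a' :: m)
  else if t = "]" then
    match m with
    | 'b' :: m' => some (pvBump m')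
    | _ => none
  else if t = "(" then
    match m with
    | 'a' :: _ => none
    | 'b' :: _ => none
    | _ => some ('c' :: m)
  else if t = ")" then
    match m with
    | 'c' :: m' => some m'
    | _ => none
  else some (pvBump m)

def pvRun : List Char → List String → Option (List Char)
  | m, [] => some m
  | m, t :: ts =>
    match pvWf1 m t with
    | some m' => pvRun m' ts
    | none => none

-- Pre_ restricts to well-formed stercus token streams (a bracket-automaton condition:
-- properly nested '[...]' applicators each with an accessor, '(...)' conditionals, and
-- '(' never inside an applicator); elsewhere A either raises IndexError on an unbalanced
-- pop or returns truncated/garbled C from leftover stack state, outside the compiler's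
-- natural input domain.
def Pre_compile_function (name : String) (args : String) (tokens : List String) (func_list : List String) : Prop :=
  pvRun [] tokens = some []
instance (name : String) (args : String) (tokens : List String) (func_list : List String) : Decidable (Pre_compile_function name args tokens func_list) := by unfold Pre_compile_function; infer_instance

def pvWitness_compile_function : String × String × List String × List String :=
  ("main", "", ["(", "x", "[", "y", "+", "]", ")"], ["f"])

def Spec_compile_function (name : String) (args : String) (tokens : List String) (func_list : List String) (out : String) : Prop := out = compile_function_alt name args tokens func_list
instance (name : String) (args : String) (tokens : List String) (func_list : List String) (out : String) : Decidable (Spec_compile_function name args tokens func_list out) := by unfold Spec_compile_function; infer_instance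

-- ===== CLAIM (what is proved, stated in full; the proofs are below) =====
def Claim_equal_compile_function : Prop := ∀ (name : String) (args : String) (tokens : List String) (func_list : List String), Dom_compile_function name args tokens func_list → Pre_compile_function name args tokens func_list → Spec_compile_function name args tokens func_list (compile_function name args tokens func_list)

-- ===== LEMMAS AND PROOFS =====

-- abstract syntax of a well-formed token stream
mutual
inductive PvItem : Type
  | atom : String → PvItem
  | app : PvItem → PvItems → PvItem
inductive PvItems : Type
  | nil : PvItems
  | cons : PvItem → PvItems → PvItems
end

mutual
inductive PvUnit : Type
  | item : PvItem → PvUnit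
  | cond : PvUnits → PvUnit
inductive PvUnits : Type
  | nil : PvUnits
  | cons : PvUnit → PvUnits → PvUnits
end

mutual
def pvTokI : PvItem → List String
  | .atom t => [t]
  | .app a as => "[" :: (pvTokI a ++ pvTokIs as ++ ["]"])
def pvTokIs : PvItems → List String
  | .nil => []
  | .cons i is => pvTokI i ++ pvTokIs is
end

mutual
def pvTokU : PvUnit → List String
  | .item i => pvTokI i
  | .cond us => "(" :: (pvTokUs us ++ [")"])
def pvTokUs : PvUnits → List String
  | .nil => []
  | .cons u us => pvTokU u ++ pvTokUs us
end

mutual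
def pvOkI : PvItem → Prop
  | .atom t => t ≠ "[" ∧ t ≠ "]" ∧ t ≠ "(" ∧ t ≠ ")"
  | .app a as => pvOkI a ∧ pvOkIs as
def pvOkIs : PvItems → Prop
  | .nil => True
  | .cons i is => pvOkI i ∧ pvOkIs is
end

mutual
def pvOkU : PvUnit → Prop
  | .item i => pvOkI i
  | .cond us => pvOkUs us
def pvOkUs : PvUnits → Prop
  | .nil => True
  | .cons u us => pvOkU u ∧ pvOkUs us
end

def pvAccI : PvItem → String
  | .atom t => t
  | .app a _ => "_d[" ++ pvAccI a ++ "]"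

def pvAccs : PvItems → List String
  | .nil => []
  | .cons i is => pvAccI i :: pvAccs is

-- lines 'apply' emits for one application
def pvApplyOut (func_list : List String) (application accessor : String) : List String :=
  pvApply func_list [] application accessor

def pvApplyAll (func_list : List String) : PvItems → String → List String
  | .nil, _ => []
  | .cons i is, acc => pvApplyOut func_list (pvAccI i) acc ++ pvApplyAll func_list is acc

mutual
def pvEmitI (func_list : List String) : PvItem → List String
  | .atom _ => []
  | .app a as => pvEmitI func_list a ++ pvEmitIs func_list as ++ pvApplyAll func_list as (pvAccI a)
def pvEmitIs (func_list : List String) : PvItems → List String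
  | .nil => []
  | .cons i is => pvEmitI func_list i ++ pvEmitIs func_list is
end

def pvCheck (acc : String) : String := "if(!_d[" ++ acc ++ "]){break;}"

def pvNextFront : PvUnit → Bool → Bool
  | .item _, _ => false
  | .cond _, b => b

mutual
def pvEmitU (func_list : List String) : PvUnit → Bool → List String
  | .item i, b => pvEmitI func_list i ++ (if b then [pvCheck (pvAccI i)] else [])
  | .cond us, _ => ["while(1){"] ++ pvEmitUs func_list us true ++ ["}"]
def pvEmitUs (func_list : List String) : PvUnits → Bool → List String
  | .nil, _ => []
  | .cons u us, b => pvEmitU func_list u b ++ pvEmitUs func_list us (pvNextFront u b)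
end

def pvPushU : PvUnit → List String
  | .item i => [pvAccI i]
  | .cond _ => []

def pvPushUs : PvUnits → List String
  | .nil => []
  | .cons u us => pvPushUs us ++ pvPushU u

-- string shape facts
theorem pvWrap_ne (s c : String) (hc : c.length = 1) : "_d[" ++ s ++ "]" ≠ c := by
  intro h
  have h' := congrArg String.length h
  rw [String.length_append, String.length_append] at h'
  have h3 : ("_d[" : String).length = 3 := rfl
  have h1 : ("]" : String).length = 1 := rfl
  omega

theorem pvAccI_ne (i : PvItem) (h : pvOkI i) : pvAccI i ≠ "[" ∧ pvAccI i ≠ "(" := by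
  cases i with
  | atom t =>
    obtain ⟨h1, _, h3, _⟩ : t ≠ "[" ∧ t ≠ "]" ∧ t ≠ "(" ∧ t ≠ ")" := h
    exact ⟨h1, h3⟩
  | app a as => exact ⟨pvWrap_ne _ _ rfl, pvWrap_ne _ _ rfl⟩

theorem pvAccs_ne (as : PvItems) (h : pvOkIs as) :
    ∀ x ∈ pvAccs as, x ≠ "[" ∧ x ≠ "(" := by
  cases as with
  | nil => intro x hx; simp [pvAccs] at hx
  | cons i is =>
    obtain ⟨hi, his⟩ : pvOkI i ∧ pvOkIs is := h
    intro x hx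
    simp only [pvAccs, List.mem_cons] at hx
    rcases hx with rfl | hx
    · exact pvAccI_ne i hi
    · exact pvAccs_ne is his x hx

theorem pvPushUs_ne (us : PvUnits) (h : pvOkUs us) :
    ∀ x ∈ pvPushUs us, x ≠ "[" ∧ x ≠ "(" := by
  cases us with
  | nil => intro x hx; simp [pvPushUs] at hx
  | cons u vs =>
    obtain ⟨hu, hvs⟩ : pvOkU u ∧ pvOkUs vs := h
    intro x hx
    simp only [pvPushUs, List.mem_append] at hx
    rcases hx with hx | hx
    · exact pvPushUs_ne vs hvs x hx
    · cases u with
      | item i =>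
        simp only [pvPushU, List.mem_singleton] at hx
        subst hx
        exact pvAccI_ne i hu
      | cond _ => simp [pvPushU] at hx

theorem pvApply_out (fl : List String) (o : List String) (a acc : String) :
    pvApply fl o a acc = o ++ pvApplyOut fl a acc := by
  simp only [pvApplyOut, pvApply]
  split_ifs <;> simp

theorem pvFoldl_applyAll (fl : List String) (acc : String) (as : PvItems) :
    ∀ out, (pvAccs as).foldl (fun o a => pvApply fl o a acc) out = out ++ pvApplyAll fl as acc := by
  cases as with
  | nil => intro out; simp [pvAccs, pvApplyAll]
  | cons i is =>
    intro out
    simp only [pvAccs, pvApplyAll, List.foldl_cons]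
    rw [pvApply_out, pvFoldl_applyAll fl acc is, List.append_assoc]

theorem pvPopApp_spec (s : List String) (d : List String) (h : ∀ x ∈ d, x ≠ "[") :
    ∀ li, pvPopApp (d ++ "[" :: s) li = (d.reverse ++ li, s) := by
  induction d with
  | nil => intro li; simp [pvPopApp]
  | cons v d ih =>
    intro li
    have hv : v ≠ "[" := h v (by simp)
    simp only [List.cons_append, pvPopApp, if_neg hv]
    rw [ih (fun x hx => h x (by simp [hx]))]
    simp

theorem pvPopCond_spec (s : List String) (d : List String) (h : ∀ x ∈ d, x ≠ "(") :
    pvPopCond (d ++ "(" :: s) = s := by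
  induction d with
  | nil => simp [pvPopCond]
  | cons v d ih =>
    have hv : v ≠ "(" := h v (by simp)
    simp only [List.cons_append, pvPopCond, if_neg hv]
    exact ih (fun x hx => h x (by simp [hx]))

theorem pvCheck_wrap (x : String) :
    "if(!_d[_d[" ++ x ++ "]]){break;}" = "if(!_d[" ++ ("_d[" ++ x ++ "]") ++ "]){break;}" := by
  have h1 : ("if(!_d[" : String) ++ "_d[" = "if(!_d[_d[" := by rfl
  have h2 : ("]" : String) ++ "]){break;}" = "]]){break;}" := by rfl
  calc "if(!_d[_d[" ++ x ++ "]]){break;}"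
      = ("if(!_d[" ++ "_d[") ++ x ++ ("]" ++ "]){break;}") := by rw [h1, h2]
    _ = "if(!_d[" ++ ("_d[" ++ x ++ "]") ++ "]){break;}" := by
        simp only [String.append_assoc]

-- ===== A-side: the stack machine evaluated on well-formed syntax =====
mutual
theorem pvStepA_item (fl : List String) (i : PvItem) (h : pvOkI i) :
    ∀ out s rest,
      List.foldl (pvStepA fl) (out, s) (pvTokI i ++ rest)
        = List.foldl (pvStepA fl)
            (out ++ pvEmitI fl i ++ (if s.head? = some "(" then [pvCheck (pvAccI i)] else []),
             pvAccI i :: s) rest := by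
  cases i with
  | atom t =>
    intro out s rest
    obtain ⟨h1, h2, h3, h4⟩ : t ≠ "[" ∧ t ≠ "]" ∧ t ≠ "(" ∧ t ≠ ")" := h
    simp only [pvTokI, List.singleton_append, List.foldl_cons]
    have hstep : pvStepA fl (out, s) t
        = (out ++ pvEmitI fl (.atom t) ++ (if s.head? = some "(" then [pvCheck (pvAccI (.atom t))] else []), t :: s) := by
      simp only [pvStepA, if_neg h2, if_neg h4, if_neg h3, if_neg h1, pvEmitI, pvAccI, pvCheck]
      split_ifs <;> simp
    rw [hstep]
    simp [pvAccI]
  | app a as =>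
    intro out s rest
    obtain ⟨ha, has⟩ : pvOkI a ∧ pvOkIs as := h
    simp only [pvTokI, List.cons_append, List.foldl_cons]
    have hstep : pvStepA fl (out, s) "[" = (out, "[" :: s) := by
      simp [pvStepA]
    rw [hstep, List.append_assoc, List.append_assoc]
    rw [pvStepA_item fl a ha out ("[" :: s) _]
    rw [if_neg (by simp), List.append_nil]
    rw [pvStepA_items fl as has _ (pvAccI a :: "[" :: s) _
      (by simp [(pvAccI_ne a ha).2])]
    simp only [List.singleton_append, List.foldl_cons]
    have hpop : pvPopApp ((pvAccs as).reverse ++ pvAccI a :: "[" :: s) [] =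
        ((pvAccI a :: pvAccs as), s) := by
      have hd : ∀ x ∈ (pvAccs as).reverse ++ [pvAccI a], x ≠ "[" := by
        intro x hx
        simp only [List.mem_append, List.mem_reverse, List.mem_singleton] at hx
        rcases hx with hx | rfl
        · exact (pvAccs_ne as has x hx).1
        · exact (pvAccI_ne a ha).1
      have := pvPopApp_spec ("[" :: s).tail ((pvAccs as).reverse ++ [pvAccI a]) hd []
      simpa using this
    have hstep2 : pvStepA fl
        (out ++ pvEmitI fl a ++ pvEmitIs fl as, (pvAccs as).reverse ++ pvAccI a :: "[" :: s) "]"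
        = (out ++ pvEmitI fl (.app a as)
             ++ (if s.head? = some "(" then [pvCheck (pvAccI (.app a as))] else []),
           pvAccI (.app a as) :: s) := by
      simp only [pvStepA, hpop, List.headD_cons, List.tail_cons]
      rw [pvFoldl_applyAll]
      simp only [pvEmitI, pvAccI, pvCheck, pvCheck_wrap]
      split_ifs <;> simp [List.append_assoc]
    rw [hstep2]

theorem pvStepA_items (fl : List String) (as : PvItems) (h : pvOkIs as) :
    ∀ out s rest, (s.head? ≠ some "(") →
      List.foldl (pvStepA fl) (out, s) (pvTokIs as ++ rest)
        = List.foldl (pvStepA fl) (out ++ pvEmitIs fl as, (pvAccs as).reverse ++ s) rest := by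
  cases as with
  | nil => intro out s rest _; simp [pvTokIs, pvEmitIs, pvAccs]
  | cons i is =>
    intro out s rest hs
    obtain ⟨hi, his⟩ : pvOkI i ∧ pvOkIs is := h
    simp only [pvTokIs, List.append_assoc]
    rw [pvStepA_item fl i hi out s _, if_neg hs, List.append_nil]
    rw [pvStepA_items fl is his _ (pvAccI i :: s) rest (by simp [(pvAccI_ne i hi).2])]
    simp [pvEmitIs, pvAccs, List.reverse_cons, List.append_assoc]
end

mutual
theorem pvStepA_unit (fl : List String) (u : PvUnit) (h : pvOkU u) :
    ∀ out s rest (b : Bool), (s.head? = some "(" ↔ b = true) →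
      List.foldl (pvStepA fl) (out, s) (pvTokU u ++ rest)
        = List.foldl (pvStepA fl) (out ++ pvEmitU fl u b, pvPushU u ++ s) rest := by
  cases u with
  | item i =>
    intro out s rest b hb
    simp only [pvTokU]
    rw [pvStepA_item fl i h out s rest]
    have hif : (if s.head? = some "(" then [pvCheck (pvAccI i)] else [])
        = (if b then [pvCheck (pvAccI i)] else []) := by
      by_cases hc : s.head? = some "("
      · rw [if_pos hc, if_pos (hb.mp hc)]
      · rw [if_neg hc]
        cases b with
        | true => exact absurd (hb.mpr rfl) hc
        | false => rfl
    rw [hif]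
    simp [pvEmitU, pvPushU, List.append_assoc]
  | cond vs =>
    intro out s rest b hb
    simp only [pvTokU, List.cons_append, List.foldl_cons, List.append_assoc]
    have hstep : pvStepA fl (out, s) "(" = (out ++ ["while(1){"], "(" :: s) := by
      simp [pvStepA]
    rw [hstep]
    rw [pvStepA_units fl vs h (out ++ ["while(1){"]) ("(" :: s) _ true (by simp)]
    simp only [List.cons_append, List.foldl_cons]
    have hstep2 : pvStepA fl
        (out ++ ["while(1){"] ++ pvEmitUs fl vs true, pvPushUs vs ++ "(" :: s) ")"
        = (out ++ ["while(1){"] ++ pvEmitUs fl vs true ++ ["}"], s) := by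
      have hpc := pvPopCond_spec s (pvPushUs vs) (fun x hx => (pvPushUs_ne vs h x hx).2)
      simp [pvStepA, hpc]
    rw [hstep2]
    simp [pvEmitU, pvPushU, List.append_assoc]

theorem pvStepA_units (fl : List String) (us : PvUnits) (h : pvOkUs us) :
    ∀ out s rest (b : Bool), (s.head? = some "(" ↔ b = true) →
      List.foldl (pvStepA fl) (out, s) (pvTokUs us ++ rest)
        = List.foldl (pvStepA fl) (out ++ pvEmitUs fl us b, pvPushUs us ++ s) rest := by
  cases us with
  | nil => intro out s rest b _; simp [pvTokUs, pvEmitUs, pvPushUs]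
  | cons u vs =>
    intro out s rest b hb
    obtain ⟨hu, hvs⟩ : pvOkU u ∧ pvOkUs vs := h
    simp only [pvTokUs, List.append_assoc]
    rw [pvStepA_unit fl u hu out s _ b hb]
    have hnext : ((pvPushU u ++ s).head? = some "(" ↔ pvNextFront u b = true) := by
      cases u with
      | item i =>
        simp only [pvPushU, pvNextFront, List.cons_append, List.head?_cons]
        constructor
        · intro hc
          exact absurd (Option.some.inj hc) (pvAccI_ne i hu).2
        · intro hc; cases hc
      | cond _ => simpa [pvPushU, pvNextFront] using hb
    rw [pvStepA_units fl vs hvs _ (pvPushU u ++ s) rest (pvNextFront u b) hnext]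
    simp [pvEmitUs, pvPushUs, List.append_assoc]
end

-- ===== B-side: the recursive-descent parser evaluated on well-formed syntax =====
theorem pvTokI_len_pos (i : PvItem) : 1 ≤ (pvTokI i).length := by
  cases i <;> simp [pvTokI]

theorem pvTokI_head (i : PvItem) (h : pvOkI i) :
    ∃ t rs, pvTokI i = t :: rs ∧ t ≠ "]" ∧ t ≠ ")" ∧ t ≠ "(" := by
  cases i with
  | atom t =>
    obtain ⟨_, h2, h3, h4⟩ : t ≠ "[" ∧ t ≠ "]" ∧ t ≠ "(" ∧ t ≠ ")" := h
    exact ⟨t, [], rfl, h2, h4, h3⟩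
  | app a as => exact ⟨"[", _, rfl, by decide, by decide, by decide⟩

theorem pvDropCons (tokens : List String) (p : Nat) (t : String) (rs : List String)
    (h : tokens.drop p = t :: rs) :
    tokens.getD p "" = t ∧ tokens.drop (p + 1) = rs ∧ p < tokens.length := by
  have hlen : p < tokens.length := by
    by_contra hc
    rw [List.drop_eq_nil_of_le (by omega)] at h
    exact absurd h (by simp)
  refine ⟨?_, ?_, hlen⟩
  · have h0 : tokens[p]? = some t := by
      rw [← List.head?_drop, h]
      rfl
    simp [List.getD_eq_getElem?_getD, h0]
  · have := congrArg List.tail h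
    simpa [List.tail_drop] using this

theorem pvDropAppend (tokens : List String) (p : Nat) (l1 l2 : List String)
    (h : tokens.drop p = l1 ++ l2) : tokens.drop (p + l1.length) = l2 := by
  have h2 : tokens.drop (p + l1.length) = (tokens.drop p).drop l1.length := by
    rw [List.drop_drop, Nat.add_comm]
  rw [h2, h, List.drop_left]

mutual
theorem pvParseItem_ok (fl tokens : List String) (it : PvItem) (h : pvOkI it) :
    ∀ fuel out p rest, tokens.drop p = pvTokI it ++ rest → 2 * (pvTokI it).length ≤ fuel →
      pvParseItem fl tokens fuel out p = (out ++ pvEmitI fl it, pvAccI it, p + (pvTokI it).length) := by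
  cases it with
  | atom t =>
    intro fuel out p rest hdrop hf
    obtain ⟨h1, _, _, _⟩ : t ≠ "[" ∧ t ≠ "]" ∧ t ≠ "(" ∧ t ≠ ")" := h
    simp only [pvTokI, List.length_cons, List.length_nil] at hf ⊢
    obtain ⟨f, rfl⟩ : ∃ f, fuel = f + 1 := ⟨fuel - 1, by omega⟩
    obtain ⟨hget, -, -⟩ := pvDropCons tokens p t rest (by simpa using hdrop)
    simp only [pvParseItem, hget, if_neg h1]
    simp [pvEmitI, pvAccI]
  | app a as =>
    intro fuel out p rest hdrop hf
    obtain ⟨ha, has⟩ : pvOkI a ∧ pvOkIs as := h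
    have hla := pvTokI_len_pos a
    simp only [pvTokI, List.length_cons, List.length_append, List.length_singleton] at hf
    obtain ⟨f, rfl⟩ : ∃ f, fuel = f + 1 := ⟨fuel - 1, by omega⟩
    rw [pvTokI] at hdrop
    simp only [List.cons_append, List.append_assoc, List.singleton_append] at hdrop
    obtain ⟨hget, hdrop1, -⟩ := pvDropCons tokens p "[" _ hdrop
    simp only [pvParseItem, hget, if_pos rfl]
    rw [pvParseItem_ok fl tokens a ha f out (p + 1) (pvTokIs as ++ "]" :: rest) hdrop1 (by omega)]
    rw [pvParseApps_ok fl tokens as has f (out ++ pvEmitI fl a) (p + 1 + (pvTokI a).length)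
      rest (pvDropAppend tokens (p + 1) (pvTokI a) _ hdrop1) (by omega)]
    simp [pvFoldl_applyAll, pvEmitI, pvEmitIs, pvAccI, pvAccs, pvEmitUs, pvEmitU, pvNextFront, pvCheck, pvTokI, pvTokIs, pvTokUs, pvTokU, List.append_assoc]
    all_goals omega

theorem pvParseApps_ok (fl tokens : List String) (as : PvItems) (h : pvOkIs as) :
    ∀ fuel out p rest, tokens.drop p = pvTokIs as ++ "]" :: rest → 2 * (pvTokIs as).length + 1 ≤ fuel →
      pvParseApps fl tokens fuel out p = (out ++ pvEmitIs fl as, pvAccs as, p + (pvTokIs as).length) := by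
  cases as with
  | nil =>
    intro fuel out p rest hdrop hf
    obtain ⟨f, rfl⟩ : ∃ f, fuel = f + 1 := ⟨fuel - 1, by omega⟩
    obtain ⟨hget, -, -⟩ := pvDropCons tokens p "]" rest (by simpa [pvTokIs] using hdrop)
    simp only [pvParseApps, hget, if_pos rfl]
    simp [pvTokIs, pvEmitIs, pvAccs]
  | cons i is =>
    intro fuel out p rest hdrop hf
    obtain ⟨hi, his⟩ : pvOkI i ∧ pvOkIs is := h
    have hli := pvTokI_len_pos i
    simp only [pvTokIs, List.length_append] at hf
    obtain ⟨f, rfl⟩ : ∃ f, fuel = f + 1 := ⟨fuel - 1, by omega⟩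
    simp only [pvTokIs, List.append_assoc] at hdrop
    obtain ⟨t, rs, htok, ht1, -, -⟩ := pvTokI_head i hi
    obtain ⟨hget, -, -⟩ := pvDropCons tokens p t (rs ++ (pvTokIs is ++ "]" :: rest))
      (by simpa [htok] using hdrop)
    simp only [pvParseApps, hget, if_neg ht1]
    rw [pvParseItem_ok fl tokens i hi f out p (pvTokIs is ++ "]" :: rest) hdrop (by omega)]
    rw [pvParseApps_ok fl tokens is his f (out ++ pvEmitI fl i) (p + (pvTokI i).length) rest
      (pvDropAppend tokens p (pvTokI i) _ hdrop) (by omega)]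
    simp [pvFoldl_applyAll, pvEmitI, pvEmitIs, pvAccI, pvAccs, pvEmitUs, pvEmitU, pvNextFront, pvCheck, pvTokI, pvTokIs, pvTokUs, pvTokU, List.append_assoc]
    all_goals omega
end

mutual
theorem pvParseUnits_close (fl tokens : List String) (us : PvUnits) (h : pvOkUs us) :
    ∀ fuel out (front : Bool) p rest,
      tokens.drop p = pvTokUs us ++ ")" :: rest → 2 * (pvTokUs us).length + 1 ≤ fuel →
      pvParseUnits fl tokens fuel out front p
        = (out ++ pvEmitUs fl us front ++ ["}"], p + (pvTokUs us).length + 1) := by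
  cases us with
  | nil =>
    intro fuel out front p rest hdrop hf
    obtain ⟨f, rfl⟩ : ∃ f, fuel = f + 1 := ⟨fuel - 1, by omega⟩
    obtain ⟨hget, -, hlt⟩ := pvDropCons tokens p ")" rest (by simpa [pvTokUs] using hdrop)
    simp only [pvParseUnits, hget, if_pos hlt, if_pos rfl]
    simp [pvTokUs, pvEmitUs]
  | cons u vs =>
    intro fuel out front p rest hdrop hf
    obtain ⟨hu, hvs⟩ : pvOkU u ∧ pvOkUs vs := h
    simp only [pvTokUs, List.length_append] at hf
    obtain ⟨f, rfl⟩ : ∃ f, fuel = f + 1 := ⟨fuel - 1, by omega⟩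
    simp only [pvTokUs, List.append_assoc] at hdrop
    cases u with
    | item i =>
      obtain ⟨t, rs, htok, -, ht2, ht3⟩ := pvTokI_head i hu
      have hli := pvTokI_len_pos i
      simp only [pvTokU] at hf hdrop
      obtain ⟨hget, -, hlt⟩ := pvDropCons tokens p t (rs ++ (pvTokUs vs ++ ")" :: rest))
        (by simpa [htok] using hdrop)
      simp only [pvParseUnits, hget, if_pos hlt, if_neg ht2, if_neg ht3]
      rw [pvParseItem_ok fl tokens i hu f out p (pvTokUs vs ++ ")" :: rest) hdrop (by omega)]
      rw [pvParseUnits_close fl tokens vs hvs f _ false (p + (pvTokI i).length) rest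
        (pvDropAppend tokens p (pvTokI i) _ hdrop) (by omega)]
      cases front <;> (simp [pvFoldl_applyAll, pvEmitI, pvEmitIs, pvAccI, pvAccs, pvEmitUs, pvEmitU, pvNextFront, pvCheck, pvTokI, pvTokIs, pvTokUs, pvTokU, List.append_assoc]; all_goals omega)
    | cond ws =>
      simp only [pvTokU, List.length_cons, List.length_append, List.length_singleton] at hf
      simp only [pvTokU, List.cons_append, List.append_assoc, List.singleton_append] at hdrop
      obtain ⟨hget, hdrop1, hlt⟩ := pvDropCons tokens p "(" _ hdrop
      simp only [pvParseUnits, hget, if_pos hlt,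
        if_neg (by decide : ¬ ("(" : String) = ")"), if_pos rfl]
      rw [pvParseUnits_close fl tokens ws hu f (out ++ ["while(1){"]) true (p + 1)
        (pvTokUs vs ++ ")" :: rest) hdrop1 (by omega)]
      have hdrop2 : tokens.drop (p + 1 + (pvTokUs ws).length + 1) = pvTokUs vs ++ ")" :: rest := by
        have := pvDropAppend tokens (p + 1) (pvTokUs ws ++ [")"]) (pvTokUs vs ++ ")" :: rest)
          (by simpa [List.append_assoc] using hdrop1)
        simpa [Nat.add_assoc] using this
      rw [pvParseUnits_close fl tokens vs hvs f _ front (p + 1 + (pvTokUs ws).length + 1) rest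
        hdrop2 (by omega)]
      simp [pvFoldl_applyAll, pvEmitI, pvEmitIs, pvAccI, pvAccs, pvEmitUs, pvEmitU, pvNextFront, pvCheck, pvTokI, pvTokIs, pvTokUs, pvTokU, List.append_assoc]
      all_goals omega

theorem pvParseUnits_end (fl tokens : List String) (us : PvUnits) (h : pvOkUs us) :
    ∀ fuel out (front : Bool) p,
      tokens.drop p = pvTokUs us → 2 * (pvTokUs us).length + 1 ≤ fuel →
      pvParseUnits fl tokens fuel out front p
        = (out ++ pvEmitUs fl us front, p + (pvTokUs us).length) := by
  cases us with
  | nil =>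
    intro fuel out front p hdrop hf
    obtain ⟨f, rfl⟩ : ∃ f, fuel = f + 1 := ⟨fuel - 1, by omega⟩
    have hge : ¬ p < tokens.length := by
      intro hc
      have hne : tokens.drop p ≠ [] := by
        intro hc2
        have := List.drop_eq_nil_iff.mp hc2
        omega
      exact hne (by simpa [pvTokUs] using hdrop)
    simp only [pvParseUnits, if_neg hge]
    simp [pvTokUs, pvEmitUs]
  | cons u vs =>
    intro fuel out front p hdrop hf
    obtain ⟨hu, hvs⟩ : pvOkU u ∧ pvOkUs vs := h
    simp only [pvTokUs, List.length_append] at hf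
    obtain ⟨f, rfl⟩ : ∃ f, fuel = f + 1 := ⟨fuel - 1, by omega⟩
    simp only [pvTokUs] at hdrop
    cases u with
    | item i =>
      obtain ⟨t, rs, htok, -, ht2, ht3⟩ := pvTokI_head i hu
      have hli := pvTokI_len_pos i
      simp only [pvTokU] at hf hdrop
      obtain ⟨hget, -, hlt⟩ := pvDropCons tokens p t (rs ++ pvTokUs vs)
        (by simpa [htok] using hdrop)
      simp only [pvParseUnits, hget, if_pos hlt, if_neg ht2, if_neg ht3]
      rw [pvParseItem_ok fl tokens i hu f out p (pvTokUs vs) hdrop (by omega)]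
      rw [pvParseUnits_end fl tokens vs hvs f _ false (p + (pvTokI i).length)
        (pvDropAppend tokens p (pvTokI i) _ hdrop) (by omega)]
      cases front <;> (simp [pvFoldl_applyAll, pvEmitI, pvEmitIs, pvAccI, pvAccs, pvEmitUs, pvEmitU, pvNextFront, pvCheck, pvTokI, pvTokIs, pvTokUs, pvTokU, List.append_assoc]; all_goals omega)
    | cond ws =>
      simp only [pvTokU, List.length_cons, List.length_append, List.length_singleton] at hf
      simp only [pvTokU, List.cons_append, List.append_assoc, List.singleton_append] at hdrop
      obtain ⟨hget, hdrop1, hlt⟩ := pvDropCons tokens p "(" _ hdrop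
      simp only [pvParseUnits, hget, if_pos hlt,
        if_neg (by decide : ¬ ("(" : String) = ")"), if_pos rfl]
      rw [pvParseUnits_close fl tokens ws hu f (out ++ ["while(1){"]) true (p + 1)
        (pvTokUs vs) hdrop1 (by omega)]
      have hdrop2 : tokens.drop (p + 1 + (pvTokUs ws).length + 1) = pvTokUs vs := by
        have := pvDropAppend tokens (p + 1) (pvTokUs ws ++ [")"]) (pvTokUs vs)
          (by simpa [List.append_assoc] using hdrop1)
        simpa [Nat.add_assoc] using this
      rw [pvParseUnits_end fl tokens vs hvs f _ front (p + 1 + (pvTokUs ws).length + 1)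
        hdrop2 (by omega)]
      simp [pvFoldl_applyAll, pvEmitI, pvEmitIs, pvAccI, pvAccs, pvEmitUs, pvEmitU, pvNextFront, pvCheck, pvTokI, pvTokIs, pvTokUs, pvTokU, List.append_assoc]
      all_goals omega
end

-- ===== decomposition: an accepted run of the bracket automaton is a well-formed parse =====
theorem pvDecomp (n : Nat) : ∀ ts : List String, ts.length ≤ n →
    (∀ m, pvRun ('a' :: m) ts = some [] →
      ∃ i r2, pvOkI i ∧ ts = pvTokI i ++ r2 ∧ pvRun ('b' :: m) r2 = some []) ∧
    (∀ m, pvRun ('b' :: m) ts = some [] →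
      ∃ as r2, pvOkIs as ∧ ts = pvTokIs as ++ "]" :: r2 ∧ pvRun (pvBump m) r2 = some []) ∧
    (∀ m, pvRun ('c' :: m) ts = some [] →
      ∃ us r2, pvOkUs us ∧ ts = pvTokUs us ++ ")" :: r2 ∧ pvRun m r2 = some []) ∧
    (pvRun [] ts = some [] → ∃ us, pvOkUs us ∧ ts = pvTokUs us) := by
  induction n with
  | zero =>
    intro ts hts
    cases ts with
    | cons t rs => simp at hts
    | nil => ?_
    refine ⟨?_, ?_, ?_, ?_⟩
    · intro m hm; simp [pvRun] at hm
    · intro m hm; simp [pvRun] at hm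
    · intro m hm; simp [pvRun] at hm
    · intro _; exact ⟨.nil, trivial, rfl⟩
  | succ n ih =>
    intro ts hts
    cases ts with
    | nil =>
      refine ⟨?_, ?_, ?_, ?_⟩
      · intro m hm; simp [pvRun] at hm
      · intro m hm; simp [pvRun] at hm
      · intro m hm; simp [pvRun] at hm
      · intro _; exact ⟨.nil, trivial, rfl⟩
    | cons t rs =>
      have hrs : rs.length ≤ n := by simpa using Nat.lt_succ_iff.mp (by simpa using hts)
      by_cases h1 : t = "["
      · subst h1
        refine ⟨?_, ?_, ?_, ?_⟩
        · -- 'a' state, '[' : open nested applicator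
          intro m hm
          simp only [pvRun, pvWf1, if_pos rfl] at hm
          obtain ⟨i, r2, hoki, hrseq, hr2⟩ := (ih rs hrs).1 ('a' :: m) hm
          have hr2len : r2.length ≤ n := by
            have := congrArg List.length hrseq; simp at this; omega
          obtain ⟨as, r3, hokas, hr2eq, hr3⟩ := (ih r2 hr2len).2.1 ('a' :: m) hr2
          refine ⟨.app i as, r3, ⟨hoki, hokas⟩, ?_, ?_⟩
          · simp [pvTokI, hrseq, hr2eq, List.append_assoc]
          · simpa [pvBump] using hr3
        · intro m hm
          simp only [pvRun, pvWf1, if_pos rfl] at hm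
          obtain ⟨i, r2, hoki, hrseq, hr2⟩ := (ih rs hrs).1 ('b' :: m) hm
          have hr2len : r2.length ≤ n := by
            have := congrArg List.length hrseq; simp at this; omega
          obtain ⟨as, r3, hokas, hr2eq, hr3⟩ := (ih r2 hr2len).2.1 ('b' :: m) hr2
          have hr3len : r3.length ≤ n := by
            have e1 := congrArg List.length hrseq; have e2 := congrArg List.length hr2eq
            simp at e1 e2; omega
          have hr3' : pvRun ('b' :: m) r3 = some [] := by simpa [pvBump] using hr3
          obtain ⟨as2, r4, hokas2, hr3eq, hr4⟩ := (ih r3 hr3len).2.1 m hr3'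
          refine ⟨.cons (.app i as) as2, r4, ⟨⟨hoki, hokas⟩, hokas2⟩, ?_, hr4⟩
          simp [pvTokIs, pvTokI, hrseq, hr2eq, hr3eq, List.append_assoc]
        · intro m hm
          simp only [pvRun, pvWf1, if_pos rfl] at hm
          obtain ⟨i, r2, hoki, hrseq, hr2⟩ := (ih rs hrs).1 ('c' :: m) hm
          have hr2len : r2.length ≤ n := by
            have := congrArg List.length hrseq; simp at this; omega
          obtain ⟨as, r3, hokas, hr2eq, hr3⟩ := (ih r2 hr2len).2.1 ('c' :: m) hr2
          have hr3len : r3.length ≤ n := by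
            have e1 := congrArg List.length hrseq; have e2 := congrArg List.length hr2eq
            simp at e1 e2; omega
          have hr3' : pvRun ('c' :: m) r3 = some [] := by simpa [pvBump] using hr3
          obtain ⟨us, r4, hokus, hr3eq, hr4⟩ := (ih r3 hr3len).2.2.1 m hr3'
          refine ⟨.cons (.item (.app i as)) us, r4, ⟨⟨hoki, hokas⟩, hokus⟩, ?_, hr4⟩
          simp [pvTokUs, pvTokU, pvTokI, hrseq, hr2eq, hr3eq, List.append_assoc]
        · intro hm
          simp only [pvRun, pvWf1, if_pos rfl] at hm
          obtain ⟨i, r2, hoki, hrseq, hr2⟩ := (ih rs hrs).1 [] hm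
          have hr2len : r2.length ≤ n := by
            have := congrArg List.length hrseq; simp at this; omega
          obtain ⟨as, r3, hokas, hr2eq, hr3⟩ := (ih r2 hr2len).2.1 [] hr2
          have hr3len : r3.length ≤ n := by
            have e1 := congrArg List.length hrseq; have e2 := congrArg List.length hr2eq
            simp at e1 e2; omega
          have hr3' : pvRun [] r3 = some [] := by simpa [pvBump] using hr3
          obtain ⟨us, hokus, hr3eq⟩ := (ih r3 hr3len).2.2.2 hr3'
          refine ⟨.cons (.item (.app i as)) us, ⟨⟨hoki, hokas⟩, hokus⟩, ?_⟩
          simp [pvTokUs, pvTokU, pvTokI, hrseq, hr2eq, hr3eq, List.append_assoc]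
      · by_cases h2 : t = "]"
        · subst h2
          refine ⟨?_, ?_, ?_, ?_⟩
          · intro m hm
            simp [pvRun, pvWf1, if_neg (by decide : ¬ ("]" : String) = "[")] at hm
          · intro m hm
            simp only [pvRun, pvWf1, if_neg (by decide : ¬ ("]" : String) = "["), if_pos rfl] at hm
            exact ⟨.nil, rs, trivial, rfl, hm⟩
          · intro m hm
            simp [pvRun, pvWf1, if_neg (by decide : ¬ ("]" : String) = "[")] at hm
          · intro hm
            simp [pvRun, pvWf1, if_neg (by decide : ¬ ("]" : String) = "[")] at hm
        · by_cases h3 : t = "("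
          · subst h3
            have hwa : ∀ m : List Char, pvWf1 ('a' :: m) "(" = none := fun m => rfl
            have hwb : ∀ m : List Char, pvWf1 ('b' :: m) "(" = none := fun m => rfl
            refine ⟨?_, ?_, ?_, ?_⟩
            · intro m hm; simp [pvRun, hwa] at hm
            · intro m hm; simp [pvRun, hwb] at hm
            · intro m hm
              have hw : pvWf1 ('c' :: m) "(" = some ('c' :: 'c' :: m) := rfl
              simp only [pvRun, hw] at hm
              obtain ⟨vs, r2, hokvs, hrseq, hr2⟩ := (ih rs hrs).2.2.1 ('c' :: m) hm
              have hr2len : r2.length ≤ n := by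
                have := congrArg List.length hrseq; simp at this; omega
              obtain ⟨us, r3, hokus, hr2eq, hr3⟩ := (ih r2 hr2len).2.2.1 m hr2
              refine ⟨.cons (.cond vs) us, r3, ⟨hokvs, hokus⟩, ?_, hr3⟩
              simp [pvTokUs, pvTokU, hrseq, hr2eq, List.append_assoc]
            · intro hm
              have hw : pvWf1 [] "(" = some ['c'] := rfl
              simp only [pvRun, hw] at hm
              obtain ⟨vs, r2, hokvs, hrseq, hr2⟩ := (ih rs hrs).2.2.1 [] hm
              have hr2len : r2.length ≤ n := by
                have := congrArg List.length hrseq; simp at this; omega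
              obtain ⟨us, hokus, hr2eq⟩ := (ih r2 hr2len).2.2.2 hr2
              refine ⟨.cons (.cond vs) us, ⟨hokvs, hokus⟩, ?_⟩
              simp [pvTokUs, pvTokU, hrseq, hr2eq, List.append_assoc]
          · by_cases h4 : t = ")"
            · subst h4
              refine ⟨?_, ?_, ?_, ?_⟩
              · intro m hm
                have hw : pvWf1 ('a' :: m) ")" = none := rfl
                simp [pvRun, hw] at hm
              · intro m hm
                have hw : pvWf1 ('b' :: m) ")" = none := rfl
                simp [pvRun, hw] at hm
              · intro m hm
                have hw : pvWf1 ('c' :: m) ")" = some m := rfl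
                simp only [pvRun, hw] at hm
                exact ⟨.nil, rs, trivial, rfl, hm⟩
              · intro hm
                have hw : pvWf1 [] ")" = none := rfl
                simp [pvRun, hw] at hm
            · -- atom token
              have hok : t ≠ "[" ∧ t ≠ "]" ∧ t ≠ "(" ∧ t ≠ ")" := ⟨h1, h2, h3, h4⟩
              have hw : ∀ m : List Char, pvWf1 m t = some (pvBump m) := by
                intro m
                simp only [pvWf1, if_neg h1, if_neg h2, if_neg h3, if_neg h4]
              refine ⟨?_, ?_, ?_, ?_⟩
              · intro m hm
                simp only [pvRun, hw, pvBump] at hm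
                exact ⟨.atom t, rs, hok, rfl, hm⟩
              · intro m hm
                have hbump : pvBump ('b' :: m) = 'b' :: m := rfl
                simp only [pvRun, hw, hbump] at hm
                obtain ⟨as, r2, hokas, hrseq, hr2⟩ := (ih rs hrs).2.1 m hm
                exact ⟨.cons (.atom t) as, r2, ⟨hok, hokas⟩, by
                  simp [pvTokIs, pvTokI, hrseq], hr2⟩
              · intro m hm
                have hbump : pvBump ('c' :: m) = 'c' :: m := rfl
                simp only [pvRun, hw, hbump] at hm
                obtain ⟨us, r2, hokus, hrseq, hr2⟩ := (ih rs hrs).2.2.1 m hm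
                exact ⟨.cons (.item (.atom t)) us, r2, ⟨hok, hokus⟩, by
                  simp [pvTokUs, pvTokU, pvTokI, hrseq], hr2⟩
              · intro hm
                have hbump : pvBump [] = [] := rfl
                simp only [pvRun, hw, hbump] at hm
                obtain ⟨us, hokus, hrseq⟩ := (ih rs hrs).2.2.2 hm
                exact ⟨.cons (.item (.atom t)) us, ⟨hok, hokus⟩, by
                  simp [pvTokUs, pvTokU, pvTokI, hrseq]⟩

-- ===== VERDICT (by name: the statement is the Claim_ definition above) =====
theorem compile_function_spec : Claim_equal_compile_function := by
  intro name args tokens fl _ hpre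
  unfold Spec_compile_function
  obtain ⟨us, hok, htok⟩ := (pvDecomp tokens.length tokens le_rfl).2.2.2 hpre
  unfold compile_function compile_function_alt
  subst htok
  have hA := pvStepA_units fl us hok
    (if name = "main"
      then ["void " ++ name ++ "(" ++ args ++ ") {"] ++ ["_d=(unsigned char *)calloc(" ++ PySem.Int.toStr 10000 ++ ", 1);"]
      else ["void " ++ name ++ "(" ++ args ++ ") {"]) [] [] false (by simp)
  have hB := pvParseUnits_end fl (pvTokUs us) us hok (2 * (pvTokUs us).length + 2)
    (if name = "main"
      then ["void " ++ name ++ "(" ++ args ++ ") {"] ++ ["_d=(unsigned char *)calloc(" ++ PySem.Int.toStr 10000 ++ ", 1);"]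
      else ["void " ++ name ++ "(" ++ args ++ ") {"]) false 0 (by simp) (by omega)
  simp only [List.append_nil] at hA
  simp only []
  rw [hA, hB]
  simp
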